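-- pv_equiv track=rewrite | github.com/llgeek/leetcode | 401_binarywatch/solution3.py | generateCombinationSum
-- ===== SOURCE A (Python) =====
-- def generateCombinationSum(numlist, count):
--     def generateCombinationSumHelper(count, pos, tmpsum):
--         if not count:
--             result.append(tmpsum)
--             return
--         for i in range(pos, len(numlist)):
--             generateCombinationSumHelper(count-1, i+1, tmpsum+numlist[i])
--
--     result = []
--     generateCombinationSumHelper(count, 0, 0)
--     return result
-- ===== SOURCE B (Python) =====
-- import itertools
--
-- def generateCombinationSum(numlist, count):
--     if count < 0 or count > len(numlist):
--         return []
--     return [sum(c) for c in itertools.combinations(numlist, count)]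
-- ===== Notes on version B (the rewrite author's own statement) =====
-- stated objective: idiomatic
-- what changed: Replaced the hand-written recursive backtracking helper with an accumulator by a comprehension over itertools.combinations (guarded by 'count < 0 -> []', the natural value there since there are no subsets of negative size).
import Mathlib
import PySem

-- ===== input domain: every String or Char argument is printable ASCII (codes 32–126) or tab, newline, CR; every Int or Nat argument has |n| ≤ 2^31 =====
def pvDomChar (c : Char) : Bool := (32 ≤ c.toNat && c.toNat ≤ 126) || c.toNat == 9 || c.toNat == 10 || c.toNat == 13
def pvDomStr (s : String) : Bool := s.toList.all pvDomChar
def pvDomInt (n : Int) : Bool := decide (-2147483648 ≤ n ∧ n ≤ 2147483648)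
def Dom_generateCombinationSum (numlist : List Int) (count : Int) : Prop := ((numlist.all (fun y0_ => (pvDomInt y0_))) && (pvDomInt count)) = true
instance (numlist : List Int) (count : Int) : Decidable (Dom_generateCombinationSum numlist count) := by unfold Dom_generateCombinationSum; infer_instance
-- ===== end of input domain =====

-- B replaces A's recursive backtracking helper by a comprehension over itertools.combinations (same order, same multiplicity); objective: idiomatic.


-- ===== PORT A =====
-- helper of A: the for-loop over i in range(pos, len) becomes structural recursion on
-- fuel = numlist.length - pos; since count != 0 in the loop, the "rest of the loop from i+1"
-- is exactly helperA with the same count at pos+1.  numlist.getD pos 0 is numlist[pos]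
-- (pos < length is guaranteed whenever fuel > 0, so the default is never used).
def generateCombinationSumHelperA (numlist : List Int) : Nat → Int → Nat → Int → List Int
  | fuel, count, pos, tmpsum =>
    if count == 0 then [tmpsum]
    else match fuel with
      | 0 => []
      | f + 1 =>
        generateCombinationSumHelperA numlist f (count - 1) (pos + 1) (tmpsum + numlist.getD pos 0)
          ++ generateCombinationSumHelperA numlist f count (pos + 1) tmpsum
def generateCombinationSumHelperA' (numlist : List Int) (fuel : Nat) (count : Int) (pos : Nat) (tmpsum : Int) : List Int :=
  generateCombinationSumHelperA numlist fuel count pos tmpsum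

def generateCombinationSum (numlist : List Int) (count : Int) : List Int :=
  generateCombinationSumHelperA' numlist numlist.length count 0 0

-- ===== PORT B =====
-- itertools.combinations in lexicographic order (combinations containing the head first)
def pyCombinations (k : Nat) (l : List Int) : List (List Int) :=
  match k, l with
  | 0, _ => [[]]
  | _ + 1, [] => []
  | k + 1, x :: xs => (pyCombinations k xs).map (fun c => x :: c) ++ pyCombinations (k + 1) xs

def generateCombinationSum_alt (numlist : List Int) (count : Int) : List Int :=
  if count < 0 || count > (numlist.length : Int) then []
  else (pyCombinations count.toNat numlist).map (fun c => c.sum)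
-- ===== PRECONDITION & SPEC =====
def Spec_generateCombinationSum (numlist : List Int) (count : Int) (out : List Int) : Prop := out = generateCombinationSum_alt numlist count
instance (numlist : List Int) (count : Int) (out : List Int) : Decidable (Spec_generateCombinationSum numlist count out) := by unfold Spec_generateCombinationSum; infer_instance

-- ===== CLAIM (what is proved, stated in full; the proofs are below) =====
def Claim_equal_generateCombinationSum : Prop := ∀ (numlist : List Int) (count : Int), Dom_generateCombinationSum numlist count → Spec_generateCombinationSum numlist count (generateCombinationSum numlist count)

-- ===== LEMMAS AND PROOFS =====

lemma helperA_neg (numlist : List Int) (fuel : Nat) (count : Int) (pos : Nat) (tmpsum : Int)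
    (h : count < 0) :
    generateCombinationSumHelperA numlist fuel count pos tmpsum = [] := by
  induction fuel generalizing count pos tmpsum with
  | zero =>
    rw [generateCombinationSumHelperA]
    have : ¬ (count == 0) = true := by simp; omega
    simp [this]
  | succ f ih =>
    rw [generateCombinationSumHelperA]
    have : ¬ (count == 0) = true := by simp; omega
    simp only [this, Bool.false_eq_true, if_false]
    rw [ih (count - 1) _ _ (by omega), ih count _ _ h]
    rfl

lemma helperA_eq (numlist : List Int) (fuel : Nat) (count : Int) (pos : Nat) (tmpsum : Int)
    (hc : 0 ≤ count) (hfuel : fuel = numlist.length - pos) (hpos : pos ≤ numlist.length) :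
    generateCombinationSumHelperA numlist fuel count pos tmpsum
      = (pyCombinations count.toNat (numlist.drop pos)).map (fun c => tmpsum + c.sum) := by
  induction fuel generalizing count pos tmpsum with
  | zero =>
    have hp : pos = numlist.length := by omega
    subst hp
    rw [generateCombinationSumHelperA]
    simp only [List.drop_length]
    by_cases h0 : count = 0
    · subst h0; simp [pyCombinations]
    · have hne : ¬ (count == 0) = true := by simp [h0]
      simp only [hne, Bool.false_eq_true, if_false]
      have hk : count.toNat = count.toNat - 1 + 1 := by omega
      rw [hk]
      simp [pyCombinations]
  | succ f ih =>
    have hplt : pos < numlist.length := by omega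
    rw [generateCombinationSumHelperA]
    by_cases h0 : count = 0
    · subst h0; simp [pyCombinations]
    · have hne : ¬ (count == 0) = true := by simp [h0]
      simp only [hne, Bool.false_eq_true, if_false]
      have hk : count.toNat = (count - 1).toNat + 1 := by omega
      have hdrop : numlist.drop pos = numlist[pos] :: numlist.drop (pos + 1) :=
        (List.getElem_cons_drop hplt).symm
      rw [ih (count - 1) (pos + 1) _ (by omega) (by omega) (by omega),
          ih count (pos + 1) _ hc (by omega) (by omega)]
      rw [hk, hdrop, pyCombinations]
      simp only [List.map_append, List.map_map]
      refine congrArg₂ _ (List.map_congr_left ?_) rfl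
      intro a _
      simp [Function.comp, List.getD, List.getElem?_eq_getElem hplt]
      ring

lemma pyCombinations_nil_of_lt (l : List Int) : ∀ (k : Nat), l.length < k → pyCombinations k l = [] := by
  induction l with
  | nil =>
    intro k hk
    cases k with
    | zero => omega
    | succ n => rfl
  | cons x xs ih =>
    intro k hk
    cases k with
    | zero => omega
    | succ n =>
      rw [pyCombinations, ih n (by simp at hk; omega), ih (n + 1) (by simp at hk; simp; omega)]
      rfl

-- ===== VERDICT (by name: the statement is the Claim_ definition above) =====
theorem generateCombinationSum_spec : Claim_equal_generateCombinationSum := by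
  intro numlist count _
  unfold Spec_generateCombinationSum generateCombinationSum generateCombinationSum_alt
    generateCombinationSumHelperA'
  by_cases h : count < 0
  · rw [helperA_neg numlist _ _ _ _ h]
    simp [h]
  · rw [helperA_eq numlist _ count 0 0 (by omega) (by omega) (by omega)]
    by_cases h2 : count > (numlist.length : Int)
    · rw [pyCombinations_nil_of_lt _ _ (by simp; omega)]
      simp [h2]
    · simp [h, h2]
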